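-- pv_equiv track=rewrite | github.com/jahirulislammolla/CodeFights | Fights/squareDigitsSequence.py | squareDigitsSequence
-- ===== SOURCE A (Python) =====
-- def squareDigitsSequence(i):
--     y=[]
--     c=0
--     while i not in y:
--         c+=1
--         y.append(i)
--         i=sum(list(map(lambda x:x**2,map(int,list(str(i))))))
--     return c
-- ===== SOURCE B (Python) =====
-- def squareDigitsSequence(i):
--     def step(n):
--         return sum(map(lambda x: x ** 2, map(int, list(str(n)))))
--
--     # Floyd cycle detection on the iteration of step: no seen-list.
--     slow = step(i)
--     fast = step(step(i))
--     while slow != fast: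
--         slow = step(slow)
--         fast = step(step(fast))
--     # tail length mu
--     mu = 0
--     p = i
--     while p != slow:
--         p = step(p)
--         slow = step(slow)
--         mu += 1
--     # cycle length lam
--     lam = 1
--     q = step(slow)
--     while q != slow:
--         q = step(q)
--         lam += 1
--     return mu + lam
-- ===== Notes on version B (the rewrite author's own statement) =====
-- stated objective: alternative
-- what changed: Replaces the growing seen-list with repeated O(c) membership scans by Floyd's tortoise-and-hare cycle detection (then recovering tail length mu and cycle length lam, returning mu+lam), using O(1) memory and no list at all.
import Mathlib
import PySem

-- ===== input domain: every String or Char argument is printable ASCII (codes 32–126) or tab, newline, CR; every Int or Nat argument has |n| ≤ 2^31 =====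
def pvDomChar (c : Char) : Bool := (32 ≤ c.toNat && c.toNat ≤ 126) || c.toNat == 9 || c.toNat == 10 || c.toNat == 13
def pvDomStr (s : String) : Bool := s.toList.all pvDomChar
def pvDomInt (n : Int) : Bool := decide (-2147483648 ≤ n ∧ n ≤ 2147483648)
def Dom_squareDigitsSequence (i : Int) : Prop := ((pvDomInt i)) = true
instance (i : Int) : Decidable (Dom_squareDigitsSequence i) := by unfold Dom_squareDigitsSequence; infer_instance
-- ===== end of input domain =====

-- B replaces A's growing seen-list (a fresh O(c) membership scan per step) by Floyd's
-- tortoise-and-hare cycle detection (tail length mu + cycle length lam), O(1) memory.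

-- ===== PORT A =====
-- A's while loop: seen-list y, counter c, current value i.  The fuel is only a totality
-- guard; the lemma goA_eq below shows the loop exits long before it runs out on every
-- admitted input.
def squareDigitsSequenceGo (fuel : Nat) (y : List Int) (c : Int) (i : Int) : Int :=
  match fuel with
  | 0 => c
  | fuel + 1 =>
    if y.contains i then c
    else
      squareDigitsSequenceGo fuel (y ++ [i]) (c + 1)
        (((PySem.Int.toChars i).map
            (fun x => ((PySem.Int.ofChars? [x]).getD 0) ^ 2)).sum)
        -- i = sum(map(lambda x: x**2, map(int, list(str(i))))); int(ch) = ofChars? [ch],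
        -- never none under Pre_ (every char of str(i) is a digit for i ≥ 0)

def squareDigitsSequence (i : Int) : Int :=
  squareDigitsSequenceGo 1000000 [] 0 i

-- ===== PORT B =====
-- step(n) = sum of squares of the digits of str(n) (the same expression A uses)
def pvStep (n : Int) : Int :=
  ((PySem.Int.toChars n).map (fun x => ((PySem.Int.ofChars? [x]).getD 0) ^ 2)).sum

-- while slow != fast: slow = step(slow); fast = step(step(fast))
def pvMeet (fuel : Nat) (slow fast : Int) : Int :=
  match fuel with
  | 0 => slow
  | fuel + 1 =>
    if slow == fast then slow else pvMeet fuel (pvStep slow) (pvStep (pvStep fast))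

-- while p != slow: p = step(p); slow = step(slow); mu += 1   (returns (mu, slow))
def pvMu (fuel : Nat) (p slow : Int) (mu : Int) : Int × Int :=
  match fuel with
  | 0 => (mu, slow)
  | fuel + 1 =>
    if p == slow then (mu, slow) else pvMu fuel (pvStep p) (pvStep slow) (mu + 1)

-- while q != slow: q = step(q); lam += 1
def pvLam (fuel : Nat) (q slow : Int) (lam : Int) : Int :=
  match fuel with
  | 0 => lam
  | fuel + 1 =>
    if q == slow then lam else pvLam fuel (pvStep q) slow (lam + 1)

def squareDigitsSequence_alt (i : Int) : Int :=
  let slow := pvStep i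
  let fast := pvStep (pvStep i)
  let m := pvMeet 1000000 slow fast
  let r := pvMu 1000000 i m 0
  let lam := pvLam 1000000 (pvStep r.2) r.2 1
  r.1 + lam

-- ===== PRECONDITION & SPEC =====
-- Python's int(ch) raises ValueError on the '-' sign character of str(i), so A (and B)
-- raise for every negative i; Pre_ admits exactly the nonnegative inputs, on which A
-- always returns.
def Pre_squareDigitsSequence (i : Int) : Prop := 0 ≤ i
instance (i : Int) : Decidable (Pre_squareDigitsSequence i) := by
  unfold Pre_squareDigitsSequence; infer_instance

def pvWitness_squareDigitsSequence : Int := (86)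

def Spec_squareDigitsSequence (i : Int) (out : Int) : Prop := out = squareDigitsSequence_alt i
instance (i : Int) (out : Int) : Decidable (Spec_squareDigitsSequence i out) := by
  unfold Spec_squareDigitsSequence; infer_instance

-- ===== CLAIM (what is proved, stated in full; the proofs are below) =====
def Claim_equal_squareDigitsSequence : Prop :=
  ∀ (i : Int), Dom_squareDigitsSequence i → Pre_squareDigitsSequence i →
    Spec_squareDigitsSequence i (squareDigitsSequence i)

-- ===== LEMMAS AND PROOFS =====

-- the orbit of the step map
def pvOrbit (x : Int) (k : Nat) : Int := pvStep^[k] x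

lemma pvOrbit_succ' (x : Int) (k : Nat) : pvOrbit x (k+1) = pvStep (pvOrbit x k) := by
  simp [pvOrbit, Function.iterate_succ_apply']

lemma pvOrbit_add (x : Int) (m k : Nat) : pvOrbit x (m + k) = pvStep^[k] (pvOrbit x m) := by
  simp [pvOrbit, Nat.add_comm m k, Function.iterate_add_apply]

-- every character emitted by Nat.toDigits 10 is a decimal digit
lemma digitChar_mem (k : Nat) (h : k < 10) :
    Nat.digitChar k ∈ ['0','1','2','3','4','5','6','7','8','9'] := by
  interval_cases k <;> decide

lemma toDigitsCore_digits (fuel n : Nat) (acc : List Char)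
    (hacc : ∀ c ∈ acc, c ∈ ['0','1','2','3','4','5','6','7','8','9']) :
    ∀ c ∈ Nat.toDigitsCore 10 fuel n acc, c ∈ ['0','1','2','3','4','5','6','7','8','9'] := by
  induction fuel generalizing n acc with
  | zero => simpa [Nat.toDigitsCore] using hacc
  | succ fuel ih =>
    rw [Nat.toDigitsCore]
    have hd := digitChar_mem (n % 10) (Nat.mod_lt _ (by norm_num))
    have hcons : ∀ c ∈ (Nat.digitChar (n % 10) :: acc),
        c ∈ ['0','1','2','3','4','5','6','7','8','9'] := by
      intro c hc
      rcases List.mem_cons.mp hc with h' | h'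
      · exact h' ▸ hd
      · exact hacc c h'
    by_cases h : n / 10 = 0
    · simpa [h] using hcons
    · simp only [if_neg h]
      exact ih _ _ hcons

lemma mem_toDigits_digit (n : Nat) :
    ∀ c ∈ Nat.toDigits 10 n, c ∈ ['0','1','2','3','4','5','6','7','8','9'] :=
  toDigitsCore_digits (n+1) n [] (by simp)

-- squaring any single digit's int() value lands in [0, 81]
lemma gval_bounds (c : Char) (h : c ∈ ['0','1','2','3','4','5','6','7','8','9']) :
    0 ≤ ((PySem.Int.ofChars? [c]).getD 0) ^ 2 ∧ ((PySem.Int.ofChars? [c]).getD 0) ^ 2 ≤ 81 := by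
  fin_cases h <;> exact ⟨by decide, by decide⟩

-- one step maps [0, 2^31] into [0, 810] (at most 10 digits, each contributing ≤ 81)
lemma pvStep_bounds (n : Int) (h0 : 0 ≤ n) (h1 : n ≤ 2147483648) :
    0 ≤ pvStep n ∧ pvStep n ≤ 810 := by
  have hn : ¬ n < 0 := by omega
  have hts : PySem.Int.toChars n = Nat.toDigits 10 n.toNat := by
    simp [PySem.Int.toChars, hn]
  have hlen : (Nat.toDigits 10 n.toNat).length ≤ 10 := by
    refine Nat.toDigits_length 10 n.toNat 10 (by norm_num) ?_
    calc n.toNat ≤ 2147483648 := by omega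
      _ < 10 ^ 10 := by norm_num
  set l := (Nat.toDigits 10 n.toNat).map (fun x => ((PySem.Int.ofChars? [x]).getD 0) ^ 2) with hl
  have hmem : ∀ v ∈ l, 0 ≤ v ∧ v ≤ 81 := by
    intro v hv
    rcases List.mem_map.mp hv with ⟨c, hc, rfl⟩
    exact gval_bounds c (mem_toDigits_digit _ c hc)
  have hstep : pvStep n = l.sum := by rw [pvStep, hts]
  constructor
  · rw [hstep]; exact List.sum_nonneg (fun v hv => (hmem v hv).1)
  · rw [hstep]
    have h81 := List.sum_le_card_nsmul l 81 (fun v hv => (hmem v hv).2)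
    simp at h81
    have hlen' : l.length ≤ 10 := by simp [hl]; omega
    have hs : l.sum ≤ (l.length : Int) * 81 := by exact_mod_cast h81
    have hc : (l.length : Int) ≤ 10 := by exact_mod_cast hlen'
    nlinarith

-- from index 1 on the orbit stays in [0, 810]
lemma pvOrbit_bounds (x : Int) (h0 : 0 ≤ x) (h1 : x ≤ 2147483648) :
    ∀ k, 1 ≤ k → 0 ≤ pvOrbit x k ∧ pvOrbit x k ≤ 810 := by
  intro k hk
  induction k with
  | zero => omega
  | succ k ih =>
    rcases Nat.eq_or_lt_of_le hk with h | h
    · have h1' : pvOrbit x 1 = pvStep x := by simp [pvOrbit]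
      rw [← h, h1']
      exact pvStep_bounds x h0 h1
    · obtain ⟨hb0, hb1⟩ := ih (by omega)
      rw [pvOrbit_succ']
      exact pvStep_bounds _ hb0 (by omega)

-- pigeonhole: a repeat among the first 812 orbit values
lemma pvOrbit_repeat (x : Int) (h0 : 0 ≤ x) (h1 : x ≤ 2147483648) :
    ∃ a b : Nat, a < b ∧ b ≤ 812 ∧ pvOrbit x a = pvOrbit x b := by
  have hmaps : ∀ k ∈ Finset.Icc 1 812, pvOrbit x k ∈ Finset.Icc (0:Int) 810 := by
    intro k hk
    rw [Finset.mem_Icc] at hk ⊢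
    exact pvOrbit_bounds x h0 h1 k hk.1
  have hcard : (Finset.Icc (0:Int) 810).card < (Finset.Icc (1:Nat) 812).card := by
    simp [Int.card_Icc, Nat.card_Icc]
  obtain ⟨a, ha, b, hb, hne, heq⟩ :=
    Finset.exists_ne_map_eq_of_card_lt_of_maps_to hcard hmaps
  rw [Finset.mem_Icc] at ha hb
  rcases Nat.lt_or_ge a b with h | h
  · exact ⟨a, b, h, hb.2, heq⟩
  · exact ⟨b, a, by omega, ha.2, heq.symm⟩

-- the image of a periodic point is periodic
lemma periodicPts_apply {f : Int → Int} {y : Int} (h : y ∈ Function.periodicPts f) :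
    f y ∈ Function.periodicPts f := by
  obtain ⟨n, hn, hp⟩ := Function.mem_periodicPts.mp h
  refine Function.mk_mem_periodicPts hn ?_
  have hcomm : f^[n] (f y) = f (f^[n] y) := by
    rw [← Function.iterate_succ_apply, Function.iterate_succ_apply']
  rw [Function.IsPeriodicPt] at hp ⊢
  rw [Function.IsFixedPt] at hp ⊢
  rw [hcomm, hp]

-- the tail/cycle structure of the orbit: tail length mu, cycle length lam
lemma pvKey (x : Int) (h0 : 0 ≤ x) (h1 : x ≤ 2147483648) :
    ∃ mu lam : Nat, 0 < lam ∧ mu + lam ≤ 812 ∧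
      (∀ m k : Nat, mu ≤ m → lam ∣ k → pvOrbit x (m + k) = pvOrbit x m) ∧
      (∀ j c : Nat, j < c → c < mu + lam → pvOrbit x j ≠ pvOrbit x c) ∧
      (∀ m k : Nat, 1 ≤ k → pvOrbit x (m + k) = pvOrbit x m → mu ≤ m) ∧
      (∀ m k : Nat, mu ≤ m → 1 ≤ k → pvOrbit x (m + k) = pvOrbit x m → lam ∣ k) := by
  classical
  obtain ⟨a, b, hab, hb812, heq⟩ := pvOrbit_repeat x h0 h1
  have hper : Function.IsPeriodicPt pvStep (b - a) (pvOrbit x a) := by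
    rw [Function.IsPeriodicPt, Function.IsFixedPt, ← pvOrbit_add]
    rw [show a + (b - a) = b by omega]
    exact heq.symm
  have hmem : pvOrbit x a ∈ Function.periodicPts pvStep :=
    Function.mk_mem_periodicPts (by omega) hper
  have hexP : ∃ m, pvOrbit x m ∈ Function.periodicPts pvStep := ⟨a, hmem⟩
  set mu := Nat.find hexP with hmu_def
  have hmu_pp : pvOrbit x mu ∈ Function.periodicPts pvStep := Nat.find_spec hexP
  set lam := Function.minimalPeriod pvStep (pvOrbit x mu) with hlam_def
  have hlam_pos : 0 < lam := Function.minimalPeriod_pos_of_mem_periodicPts hmu_pp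
  have P1 : ∀ m, mu ≤ m → pvOrbit x m ∈ Function.periodicPts pvStep ∧
      Function.minimalPeriod pvStep (pvOrbit x m) = lam := by
    intro m hm
    induction m, hm using Nat.le_induction with
    | base => exact ⟨hmu_pp, rfl⟩
    | succ m hm ih =>
      rw [pvOrbit_succ']
      exact ⟨periodicPts_apply ih.1, by rw [Function.minimalPeriod_apply ih.1, ih.2]⟩
  have hA : ∀ m k : Nat, mu ≤ m → lam ∣ k → pvOrbit x (m + k) = pvOrbit x m := by
    intro m k hm hdvd
    have := (Function.isPeriodicPt_iff_minimalPeriod_dvd).mpr ((P1 m hm).2 ▸ hdvd)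
    rw [pvOrbit_add]
    exact this
  have hC : ∀ m k : Nat, 1 ≤ k → pvOrbit x (m + k) = pvOrbit x m → mu ≤ m := by
    intro m k hk hkeq
    refine Nat.find_min' hexP ?_
    refine Function.mk_mem_periodicPts (n := k) (by omega) ?_
    rw [Function.IsPeriodicPt, Function.IsFixedPt, ← pvOrbit_add, hkeq]
  have hD : ∀ m k : Nat, mu ≤ m → 1 ≤ k → pvOrbit x (m + k) = pvOrbit x m → lam ∣ k := by
    intro m k hm hk hkeq
    have hp : Function.IsPeriodicPt pvStep k (pvOrbit x m) := by
      rw [Function.IsPeriodicPt, Function.IsFixedPt, ← pvOrbit_add, hkeq]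
    have hd := hp.minimalPeriod_dvd
    rwa [(P1 m hm).2] at hd
  have hB : ∀ j c : Nat, j < c → c < mu + lam → pvOrbit x j ≠ pvOrbit x c := by
    intro j c hjc hc hne
    have hrw : pvOrbit x (j + (c - j)) = pvOrbit x j := by
      rw [show j + (c - j) = c by omega]; exact hne.symm
    have hmuj : mu ≤ j := hC j (c - j) (by omega) hrw
    have hdvd : lam ∣ (c - j) := hD j (c - j) hmuj (by omega) hrw
    have hlej : lam ≤ c - j := Nat.le_of_dvd (by omega) hdvd
    omega
  have hle : mu + lam ≤ 812 := by
    by_contra hgt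
    exact hB a b hab (by omega) heq
  exact ⟨mu, lam, hlam_pos, hle, hA, hB, hC, hD⟩

-- A's loop characterised on the orbit: it returns the first repeat index R
lemma go_succ (fuel : Nat) (y : List Int) (c i : Int) :
    squareDigitsSequenceGo (fuel + 1) y c i =
      if y.contains i then c else squareDigitsSequenceGo fuel (y ++ [i]) (c + 1) (pvStep i) := rfl

lemma goA_eq (x : Int) (R : Nat)
    (hinj : ∀ j c : Nat, j < c → c < R → pvOrbit x j ≠ pvOrbit x c)
    (hrep : ∃ j, j < R ∧ pvOrbit x j = pvOrbit x R) :
    ∀ fuel k : Nat, k ≤ R → R < k + fuel →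
      squareDigitsSequenceGo fuel ((List.range k).map (pvOrbit x)) (k : Int) (pvOrbit x k)
        = (R : Int) := by
  intro fuel
  induction fuel with
  | zero => intro k h1 h2; omega
  | succ fuel ih =>
    intro k h1 h2
    rw [go_succ]
    have hmem : ((List.range k).map (pvOrbit x)).contains (pvOrbit x k) = true ↔
        ∃ j, j < k ∧ pvOrbit x j = pvOrbit x k := by
      simp
    rcases Nat.eq_or_lt_of_le h1 with hkR | hkR
    · subst hkR
      rw [if_pos (hmem.mpr (by simpa using hrep))]
    · rw [if_neg]
      · have hy : (List.range k).map (pvOrbit x) ++ [pvOrbit x k]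
            = (List.range (k+1)).map (pvOrbit x) := by
          rw [List.range_succ, List.map_append]; rfl
        rw [hy, ← pvOrbit_succ']
        have hcast : ((k : Int) + 1) = ((k + 1 : Nat) : Int) := by push_cast; ring
        rw [hcast]
        exact ih (k+1) (by omega) (by omega)
      · simp only [hmem]
        push Not
        intro j hj
        exact hinj j k hj hkR

-- Floyd's meet loop exits at the first t ≥ 1 with orbit t = orbit 2t
lemma pvMeet_eq (x : Int) (T : Nat) (hmeet : pvOrbit x T = pvOrbit x (2 * T))
    (hmin : ∀ t, 1 ≤ t → t < T → pvOrbit x t ≠ pvOrbit x (2 * t)) :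
    ∀ fuel k : Nat, k + 1 ≤ T → T ≤ k + fuel →
      pvMeet fuel (pvOrbit x (k + 1)) (pvOrbit x (2 * (k + 1))) = pvOrbit x T := by
  intro fuel
  induction fuel with
  | zero => intro k h1 h2; omega
  | succ fuel ih =>
    intro k h1 h2
    rw [pvMeet]
    rcases Nat.eq_or_lt_of_le h1 with hkT | hkT
    · rw [if_pos (by simp [hkT, hmeet])]
      rw [hkT]
    · rw [if_neg (by simpa using hmin (k+1) (by omega) hkT)]
      have e1 : pvStep (pvOrbit x (k + 1)) = pvOrbit x (k + 1 + 1) := (pvOrbit_succ' x (k+1)).symm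
      have e2 : pvStep (pvStep (pvOrbit x (2 * (k + 1)))) = pvOrbit x (2 * (k + 1 + 1)) := by
        rw [← pvOrbit_succ', ← pvOrbit_succ']
        ring_nf
      rw [e1, e2]
      exact ih (k+1) (by omega) (by omega)

-- the tail loop exits after exactly mu iterations
lemma pvMu_eq (x : Int) (T mu : Nat) (hstop : pvOrbit x (mu + T) = pvOrbit x mu)
    (hmin : ∀ j, j < mu → pvOrbit x j ≠ pvOrbit x (j + T)) :
    ∀ fuel j : Nat, j ≤ mu → mu < j + fuel →
      pvMu fuel (pvOrbit x j) (pvOrbit x (j + T)) (j : Int) = ((mu : Int), pvOrbit x mu) := by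
  intro fuel
  induction fuel with
  | zero => intro j h1 h2; omega
  | succ fuel ih =>
    intro j h1 h2
    rw [pvMu]
    rcases Nat.eq_or_lt_of_le h1 with hjm | hjm
    · subst hjm
      rw [if_pos (by simp [hstop])]
      rw [hstop]
    · rw [if_neg (by simpa using hmin j hjm)]
      have e1 : pvStep (pvOrbit x j) = pvOrbit x (j + 1) := (pvOrbit_succ' x j).symm
      have e2 : pvStep (pvOrbit x (j + T)) = pvOrbit x (j + 1 + T) := by
        rw [← pvOrbit_succ']; ring_nf
      have e3 : ((j : Int) + 1) = ((j + 1 : Nat) : Int) := by push_cast; ring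
      rw [e1, e2, e3]
      exact ih (j+1) (by omega) (by omega)

-- the cycle-length loop exits after exactly lam - 1 iterations
lemma pvLam_eq (x : Int) (mu lam : Nat)
    (hstop : pvOrbit x (mu + lam) = pvOrbit x mu)
    (hmin : ∀ j, 1 ≤ j → j < lam → pvOrbit x (mu + j) ≠ pvOrbit x mu) :
    ∀ fuel j : Nat, 1 ≤ j → j ≤ lam → lam < j + fuel →
      pvLam fuel (pvOrbit x (mu + j)) (pvOrbit x mu) (j : Int) = (lam : Int) := by
  intro fuel
  induction fuel with
  | zero => intro j h1 h2 h3; omega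
  | succ fuel ih =>
    intro j h1 h2 h3
    rw [pvLam]
    rcases Nat.eq_or_lt_of_le h2 with hjl | hjl
    · subst hjl
      rw [if_pos (by simp [hstop])]
    · rw [if_neg (by simpa using hmin j h1 hjl)]
      have e1 : pvStep (pvOrbit x (mu + j)) = pvOrbit x (mu + (j + 1)) := by
        rw [← pvOrbit_succ']; ring_nf
      have e3 : ((j : Int) + 1) = ((j + 1 : Nat) : Int) := by push_cast; ring
      rw [e1, e3]
      exact ih (j+1) (by omega) (by omega) (by omega)

-- ===== VERDICT (by name: the statement is the Claim_ definition above) =====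
theorem squareDigitsSequence_spec : Claim_equal_squareDigitsSequence := by
  intro x hdom hpre
  unfold Spec_squareDigitsSequence
  have h0 : 0 ≤ x := hpre
  have h1 : x ≤ 2147483648 := by
    simp [Dom_squareDigitsSequence, pvDomInt] at hdom
    exact hdom.2
  classical
  obtain ⟨mu, lam, hlam, h812, hA, hB, hC, hD⟩ := pvKey x h0 h1
  have ho0 : pvOrbit x 0 = x := rfl
  -- A's side: A returns mu + lam, the first repeat index
  have hAside : squareDigitsSequence x = ((mu + lam : Nat) : Int) := by
    have hrep : ∃ j, j < mu + lam ∧ pvOrbit x j = pvOrbit x (mu + lam) :=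
      ⟨mu, by omega, (hA mu lam le_rfl dvd_rfl).symm⟩
    have hgo := goA_eq x (mu + lam) hB hrep 1000000 0 (by omega) (by omega)
    simpa [squareDigitsSequence, ho0] using hgo
  -- B's side: the meet point
  have hQ0 : 1 ≤ lam * (mu + 1) ∧ pvOrbit x (lam * (mu + 1)) = pvOrbit x (2 * (lam * (mu + 1))) := by
    constructor
    · exact Nat.mul_pos hlam (by omega)
    · have hmule : mu ≤ lam * (mu + 1) := by
        have := Nat.le_mul_of_pos_left (mu + 1) hlam; omega
      have hper := hA (lam * (mu + 1)) (lam * (mu + 1)) hmule (dvd_mul_right _ _)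
      rw [two_mul]; exact hper.symm
  have hexQ : ∃ t : Nat, 1 ≤ t ∧ pvOrbit x t = pvOrbit x (2 * t) := ⟨lam * (mu + 1), hQ0⟩
  set T := Nat.find hexQ with hT_def
  obtain ⟨hT1, hTmeet⟩ : 1 ≤ T ∧ pvOrbit x T = pvOrbit x (2 * T) := Nat.find_spec hexQ
  have hTmin : ∀ t, 1 ≤ t → t < T → pvOrbit x t ≠ pvOrbit x (2 * t) := by
    intro t h1t h2t hne
    exact Nat.find_min hexQ h2t ⟨h1t, hne⟩
  have hTle : T ≤ lam * (mu + 1) := Nat.find_min' hexQ hQ0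
  have hTbound : T ≤ 659344 := by
    have hl : lam ≤ 812 := by omega
    have hm : mu + 1 ≤ 812 := by omega
    have := Nat.mul_le_mul hl hm
    omega
  have hTT : pvOrbit x (T + T) = pvOrbit x T := by
    rw [← two_mul]; exact hTmeet.symm
  have hmuT : mu ≤ T := hC T T hT1 hTT
  have hlamT : lam ∣ T := hD T T hmuT hT1 hTT
  -- the three loops of B
  have hmeet_val : pvMeet 1000000 (pvStep x) (pvStep (pvStep x)) = pvOrbit x T := by
    have h := pvMeet_eq x T hTmeet hTmin 1000000 0 (by omega) (by omega)
    have e1 : pvOrbit x (0 + 1) = pvStep x := by rw [pvOrbit_succ', ho0]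
    have e2 : pvOrbit x (2 * (0 + 1)) = pvStep (pvStep x) := by
      rw [show 2 * (0 + 1) = 1 + 1 by omega, pvOrbit_succ', pvOrbit_succ', ho0]
    rwa [e1, e2] at h
  have hstopMu : pvOrbit x (mu + T) = pvOrbit x mu := hA mu T le_rfl hlamT
  have hminMu : ∀ j, j < mu → pvOrbit x j ≠ pvOrbit x (j + T) := by
    intro j hj hne
    have := hC j T hT1 hne.symm
    omega
  have hmu_val : pvMu 1000000 x (pvOrbit x T) 0 = ((mu : Int), pvOrbit x mu) := by
    have h := pvMu_eq x T mu hstopMu hminMu 1000000 0 (by omega) (by omega)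
    simpa [ho0] using h
  have hstopLam : pvOrbit x (mu + lam) = pvOrbit x mu := hA mu lam le_rfl dvd_rfl
  have hminLam : ∀ j, 1 ≤ j → j < lam → pvOrbit x (mu + j) ≠ pvOrbit x mu := by
    intro j h1j h2j hne
    have := Nat.le_of_dvd (by omega) (hD mu j le_rfl h1j hne)
    omega
  have hlam_val : pvLam 1000000 (pvStep (pvOrbit x mu)) (pvOrbit x mu) 1 = (lam : Int) := by
    have h := pvLam_eq x mu lam hstopLam hminLam 1000000 1 le_rfl hlam (by omega)
    rw [← pvOrbit_succ' x mu] at *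
    simpa using h
  -- assemble B
  have hBside : squareDigitsSequence_alt x = (mu : Int) + (lam : Int) := by
    rw [squareDigitsSequence_alt]
    simp only [hmeet_val, hmu_val, hlam_val]
  rw [hAside, hBside]
  push_cast
  ring
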